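-- pv_equiv track=rewrite | github.com/devgin23/masterCote | Programmers/report.py | solution
-- ===== SOURCE A (Python) =====
-- def solution(id_list,report,k):
--     answer = []
--
--     # report 중복 없애기
--     set_report = set(report)
--     # 신고 당한 갯수 dict 만들기
--     numDic = dict()
--     # 신고 한 애들의 배열 dict 만들기
--     listDic = dict()
--     # answer로 낼 메일 받은 dict 만들기
--     answerDic = dict()
--     for i in id_list:
--         numDic[i] = 0
--         listDic[i] = []
--         answerDic[i] = 0
--     for i in set_report:
--         reporter, reported = i.split()
--         numDic[reported] += 1
--         # b를 신고한 애가 a, c 가 있다. 신고당한애가 Key, 신고한 애들이 Value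
--         listDic[reported].append(reporter)
--     list = []
--     for i in numDic.keys():
--         if numDic[i]>=k:
--             list.append(i)
--     # 정지 당한 애 한명
--     for i in list:
--         # 걔를 신고한 애들의 리스트
--         for j in listDic[i]:
--             answerDic[j] += 1
--     for i in answerDic:
--         answer.append(answerDic[i])
--     return answer
-- ===== SOURCE B (Python) =====
-- def solution(id_list, report, k):
--     uniq = set(report)
--     cnt = {}
--     for r in uniq:
--         reporter, reported = r.split()
--         cnt[reported] = cnt.get(reported, 0) + 1
--     banned = {u for u, c in cnt.items() if c >= k}
--     mail = {i: 0 for i in id_list}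
--     for r in uniq:
--         reporter, reported = r.split()
--         if reported in banned:
--             mail[reporter] += 1
--     return [mail[i] for i in mail]
-- ===== Notes on version B (the rewrite author's own statement) =====
-- stated objective: simpler
-- what changed: B drops A's reported->reporters index dict (listDic) and the banned-users x reporters nested pass: it builds one count dict over the distinct reports, forms a banned set, and rescans the distinct reports once, incrementing a reporter's mail count when the reported user is banned.
-- outside the precondition, e.g. on solution(['a'], ['b a'], 2): A returns [0], B returns [0]
import Mathlib
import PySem

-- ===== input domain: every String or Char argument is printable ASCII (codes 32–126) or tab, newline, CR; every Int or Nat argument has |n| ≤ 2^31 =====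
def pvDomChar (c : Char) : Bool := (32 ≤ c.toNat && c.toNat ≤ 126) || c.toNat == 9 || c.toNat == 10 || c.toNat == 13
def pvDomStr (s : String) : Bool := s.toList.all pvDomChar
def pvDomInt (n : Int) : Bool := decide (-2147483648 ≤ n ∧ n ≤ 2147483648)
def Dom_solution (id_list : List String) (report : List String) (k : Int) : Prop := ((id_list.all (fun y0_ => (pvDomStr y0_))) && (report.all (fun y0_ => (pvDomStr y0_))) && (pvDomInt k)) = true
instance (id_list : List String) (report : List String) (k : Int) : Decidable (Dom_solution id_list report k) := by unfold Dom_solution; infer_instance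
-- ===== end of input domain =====

-- B replaces A's reported->reporters index dict and its banned-users × reporters nested pass by a banned set
-- plus a second linear scan of the distinct reports (objective: simpler).


-- ===== PORT A =====
-- Transliteration of A. 'reporter, reported = i.split()' is ported total via getD, and the
-- KeyError-raising 'numDic[reported] += 1' / 'listDic[reported].append(...)' / 'answerDic[j] += 1'
-- via Dict.modify; exact under Pre_solution (2 tokens, both keys present).
def solution (id_list : List String) (report : List String) (k : Int) : List Int :=
  let set_report := PySem.Set.ofList report
  -- for i in id_list: numDic[i] = 0; listDic[i] = []; answerDic[i] = 0
  let dicts := id_list.foldl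
    (fun (st : PySem.Dict String Int × PySem.Dict String (List String) × PySem.Dict String Int) i =>
      (st.1.insert i 0, st.2.1.insert i ([] : List String), st.2.2.insert i 0))
    (PySem.Dict.empty, PySem.Dict.empty, PySem.Dict.empty)
  -- for i in set_report: reporter, reported = i.split(); numDic[reported] += 1; listDic[reported].append(reporter)
  let nd := set_report.foldl
    (fun (st : PySem.Dict String Int × PySem.Dict String (List String)) i =>
      (st.1.modify ((PySem.Str.split₀ i).getD 1 "") 0 (· + 1),
       st.2.modify ((PySem.Str.split₀ i).getD 1 "") [] (· ++ [(PySem.Str.split₀ i).getD 0 ""])))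
    (dicts.1, dicts.2.1)
  -- list = [i for i in numDic.keys() if numDic[i] >= k]   (as the appending loop)
  let lst := (PySem.Dict.keys nd.1).foldl
    (fun acc i => if k ≤ nd.1.getD i 0 then acc ++ [i] else acc) []
  -- for i in list: for j in listDic[i]: answerDic[j] += 1
  let answerDic := lst.foldl
    (fun d i => (nd.2.getD i []).foldl (fun d j => d.modify j 0 (· + 1)) d) dicts.2.2
  -- for i in answerDic: answer.append(answerDic[i])
  (PySem.Dict.keys answerDic).foldl (fun acc i => acc ++ [answerDic.getD i 0]) []

-- ===== PORT B =====
-- Transliteration of Source B; 'mail[reporter] += 1' ported via Dict.modify (exact under Pre_solution).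
def solution_alt (id_list : List String) (report : List String) (k : Int) : List Int :=
  let uniq := PySem.Set.ofList report
  -- cnt[reported] = cnt.get(reported, 0) + 1
  let cnt := uniq.foldl
    (fun (d : PySem.Dict String Int) r =>
      d.insert ((PySem.Str.split₀ r).getD 1 "") (d.getD ((PySem.Str.split₀ r).getD 1 "") 0 + 1))
    PySem.Dict.empty
  -- banned = {u for u, c in cnt.items() if c >= k}
  let banned : PySem.Set String :=
    PySem.Set.ofList (((PySem.Dict.items cnt).filter (fun p => k ≤ p.2)).map (·.1))
  -- mail = {i: 0 for i in id_list}
  let mail0 := id_list.foldl (fun (d : PySem.Dict String Int) i => d.insert i 0) PySem.Dict.empty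
  -- for r in uniq: if reported in banned: mail[reporter] += 1
  let mail := uniq.foldl
    (fun d r =>
      if PySem.Set.contains banned ((PySem.Str.split₀ r).getD 1 "")
      then d.modify ((PySem.Str.split₀ r).getD 0 "") 0 (· + 1) else d)
    mail0
  -- [mail[i] for i in mail]
  (PySem.Dict.keys mail).map (fun i => mail.getD i 0)

-- ===== PRECONDITION & SPEC =====
-- Pre_solution restricts to the problem's stated domain: every report is "reporter reported" (exactly two
-- whitespace-separated tokens) with both ids in id_list. Outside it A raises ValueError (not 2 tokens) or
-- KeyError (reported not in id_list; reporter not in id_list once its target is banned); on the one excluded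
-- shape where A still returns (a reporter outside id_list whose target never gets banned) B returns the same value.
def Pre_solution (id_list : List String) (report : List String) (k : Int) : Prop :=
  ∀ r ∈ report, (PySem.Str.split₀ r).length = 2 ∧
    (PySem.Str.split₀ r).getD 0 "" ∈ id_list ∧ (PySem.Str.split₀ r).getD 1 "" ∈ id_list
instance (id_list : List String) (report : List String) (k : Int) : Decidable (Pre_solution id_list report k) := by unfold Pre_solution; infer_instance

def pvWitness_solution : List String × List String × Int :=
  (["muzi", "frodo", "apeach", "neo"], ["muzi frodo", "apeach frodo", "frodo neo", "muzi neo", "apeach muzi"], 2)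

def Spec_solution (id_list : List String) (report : List String) (k : Int) (out : List Int) : Prop := out = solution_alt id_list report k
instance (id_list : List String) (report : List String) (k : Int) (out : List Int) : Decidable (Spec_solution id_list report k out) := by unfold Spec_solution; infer_instance

-- ===== CLAIM (what is proved, stated in full; the proofs are below) =====
def Claim_equal_solution : Prop := ∀ (id_list : List String) (report : List String) (k : Int), Dom_solution id_list report k → Pre_solution id_list report k → Spec_solution id_list report k (solution id_list report k)

-- ===== LEMMAS AND PROOFS =====
-- a dict built by inserting the constant c for every key reads back c everywhere
theorem pv_base0_getD {nu : Type} (l : List String) (c : nu) (t : String) :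
    (l.foldl (fun (d : PySem.Dict String nu) i => d.insert i c) PySem.Dict.empty).getD t c = c := by
  suffices h : ∀ (d : PySem.Dict String nu), (∀ t', d.getD t' c = c) →
      (l.foldl (fun d i => d.insert i c) d).getD t c = c by
    exact h _ (fun t' => PySem.Dict.getD_empty t' c)
  induction l with
  | nil => intro d h; exact h t
  | cons x xs ih =>
    intro d h
    refine ih _ (fun t' => ?_)
    rw [PySem.Dict.getD_insert]
    split <;> [rfl; exact h t']

theorem pv_base0_keys {nu : Type} (l : List String) (c : nu) :
    (l.foldl (fun (d : PySem.Dict String nu) i => d.insert i c) PySem.Dict.empty).keys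
      = PySem.Set.ofList l := by
  rw [PySem.Dict.keys_foldl_insert l (fun _ _ => c) PySem.Dict.empty]
  simp [PySem.Set.update_nil_left]

-- counting loop 'd[x] += 1' over a zero-initialised dict
theorem pv_modify_getD (l : List String) (base : List String) (t : String) :
    ((l.foldl (fun (d : PySem.Dict String Int) x => d.modify x 0 (fun y => y + 1))
        (base.foldl (fun (d : PySem.Dict String Int) i => d.insert i 0) PySem.Dict.empty)).getD t 0)
      = (l.count t : Int) := by
  rw [PySem.Dict.getD_foldl_modify_add_one, pv_base0_getD, zero_add]

theorem pv_modify_keys (l : List String) (base : List String) :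
    ((l.foldl (fun (d : PySem.Dict String Int) x => d.modify x 0 (fun y => y + 1))
        (base.foldl (fun (d : PySem.Dict String Int) i => d.insert i 0) PySem.Dict.empty)).keys)
      = PySem.Set.update (PySem.Set.ofList base) l := by
  rw [PySem.Dict.keys_foldl_modify l 0 (fun _ _ => (· + 1)), pv_base0_keys]

-- grouping loop 'd[p[0]].append(p[1])' over an empty-list-initialised dict
theorem pv_group_getD (l : List (String × String)) (base : List String) (t : String) :
    ((l.foldl (fun (d : PySem.Dict String (List String)) q => d.modify q.1 [] (fun x => x ++ [q.2]))
        (base.foldl (fun (d : PySem.Dict String (List String)) i => d.insert i []) PySem.Dict.empty)).getD t [])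
      = (l.filter (fun q => q.1 == t)).map (fun q => q.2) := by
  rw [PySem.Dict.getD_foldl_modify_append, pv_base0_getD, List.nil_append]

theorem pv_update_of_sub (base xs : List String) (h : ∀ y ∈ xs, y ∈ base) :
    PySem.Set.update (PySem.Set.ofList base) xs = PySem.Set.ofList base := by
  rw [PySem.Set.update_eq_append_filter]
  have hnil : (PySem.Set.ofList xs).filter (fun y => !(PySem.Set.ofList base).contains y) = [] := by
    rw [List.filter_eq_nil_iff]
    intro y hy
    have : y ∈ base := h y ((PySem.Set.mem_ofList xs y).mp hy)
    simp [PySem.Set.mem_ofList, this]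
  rw [hnil, List.append_nil]

theorem pv_countP_or {a : Type} (S : List a) (p1 p2 : a → Bool)
    (h : ∀ r, ¬(p1 r = true ∧ p2 r = true)) :
    S.countP (fun r => p1 r || p2 r) = S.countP p1 + S.countP p2 := by
  induction S with
  | nil => simp
  | cons x xs ih =>
    simp only [List.countP_cons, ih]
    have := h x
    cases hp : p1 x <;> cases hq : p2 x <;> simp_all <;> omega

theorem pv_sum_countP {a : Type} (l : List String) (hn : l.Nodup) (S : List a)
    (q : a → Bool) (f : a → String) :
    (l.map (fun i => S.countP (fun r => q r && (f r == i)))).sum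
      = S.countP (fun r => q r && decide (f r ∈ l)) := by
  induction l with
  | nil => simp
  | cons i t ih =>
    have hnt : t.Nodup := hn.of_cons
    have hni : i ∉ t := by simp_all [List.nodup_cons]
    have hcong : S.countP (fun r => q r && decide (f r ∈ i :: t))
        = S.countP (fun r => (q r && (f r == i)) || (q r && decide (f r ∈ t))) := by
      apply List.countP_congr
      intro r _
      by_cases h1 : f r = i <;> by_cases h2 : f r ∈ t <;> simp [h1, h2] <;> tauto
    rw [List.map_cons, List.sum_cons, ih hnt, hcong,
        pv_countP_or S _ _ (fun r hc => hni (by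
          have h1 := hc.1
          have h2 := hc.2
          simp only [Bool.and_eq_true, beq_iff_eq, decide_eq_true_eq] at h1 h2
          rw [← h1.2]; exact h2.2))]

-- the combinatorial core: summing the reporter lists of the banned users is one filtered scan
theorem pv_core (S lst : List String) (hn : lst.Nodup) (g f : String → String) (p : String → Bool)
    (hiff : ∀ r ∈ S, (f r ∈ lst) ↔ p r = true) (j : String) :
    (lst.flatMap (fun i => (S.filter (fun r => f r == i)).map g)).count j
      = ((S.filter p).map g).count j := by
  rw [List.count_flatMap]
  have h1 : (List.map (List.count j ∘ fun i => (S.filter (fun r => f r == i)).map g) lst)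
      = lst.map (fun i => S.countP (fun r => (g r == j) && (f r == i))) := by
    apply List.map_congr_left
    intro i _
    simp only [Function.comp_apply, List.count_eq_countP, List.countP_map, List.countP_filter,
      Function.comp_def]
  rw [h1, pv_sum_countP lst hn S (fun r => g r == j) f]
  rw [List.count_eq_countP, List.countP_map, List.countP_filter]
  apply List.countP_congr
  intro r hr
  have := hiff r hr
  by_cases h2 : p r = true
  · simp [h2, this.mpr h2]
  · have : f r ∉ lst := fun hm => h2 (this.mp hm)
    simp [this, h2]


-- B's whole pipeline, with the split functions and the distinct-report list symbolic
theorem pvB_pipeline (S base : List String) (ted rp : String → String) (k : Int)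
    (_hted : ∀ r ∈ S, ted r ∈ base) (hrp : ∀ r ∈ S, rp r ∈ base) :
    ((List.foldl
        (fun d r =>
          if (PySem.Set.ofList
                (List.map (fun x => x.1)
                  (List.filter (fun p => decide (k ≤ p.2))
                    (PySem.Dict.items
                      (List.foldl (fun (d : PySem.Dict String Int) r => d.insert (ted r) (d.getD (ted r) 0 + 1))
                        PySem.Dict.empty S))))).contains (ted r) = true
          then d.modify (rp r) 0 (fun x => x + 1) else d)
        (List.foldl (fun (d : PySem.Dict String Int) i => d.insert i 0) PySem.Dict.empty base) S).keys).map
      (fun i =>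
        (List.foldl
          (fun d r =>
            if (PySem.Set.ofList
                  (List.map (fun x => x.1)
                    (List.filter (fun p => decide (k ≤ p.2))
                      (PySem.Dict.items
                        (List.foldl (fun (d : PySem.Dict String Int) r => d.insert (ted r) (d.getD (ted r) 0 + 1))
                          PySem.Dict.empty S))))).contains (ted r) = true
            then d.modify (rp r) 0 (fun x => x + 1) else d)
          (List.foldl (fun (d : PySem.Dict String Int) i => d.insert i 0) PySem.Dict.empty base) S).getD i 0)
    = (PySem.Set.ofList base).map (fun j =>
        (((S.filter (fun r => decide (k ≤ ((S.map ted).count (ted r) : Int)))).map rp).count j : Int)) := by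
  have hcnt : List.foldl (fun (d : PySem.Dict String Int) r => d.insert (ted r) (d.getD (ted r) 0 + 1))
      PySem.Dict.empty S = PySem.Dict.counter (S.map ted) := by
    rw [← List.foldl_map (f := ted) (g := fun (d : PySem.Dict String Int) x => d.insert x (d.getD x 0 + 1)),
        PySem.Dict.foldl_insert_getD_add_one_eq_counter]
  rw [hcnt, PySem.Dict.items_counter]
  set B := List.map (fun x => x.1)
      (List.filter (fun p => decide (k ≤ p.2))
        (List.map (fun u => (u, ((S.map ted).count u : Int))) (PySem.Set.ofList (S.map ted)))) with hB
  have hb : ∀ r ∈ S, (PySem.Set.ofList B).contains (ted r)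
      = decide (k ≤ ((S.map ted).count (ted r) : Int)) := by
    intro r hr
    have hmem : ted r ∈ S.map ted := List.mem_map_of_mem hr
    by_cases hk : k ≤ ((S.map ted).count (ted r) : Int)
    · have hin : ted r ∈ B := by
        rw [hB]
        refine List.mem_map.mpr ⟨(ted r, ((S.map ted).count (ted r) : Int)), ?_, rfl⟩
        refine List.mem_filter.mpr ⟨?_, by simpa using hk⟩
        exact List.mem_map.mpr ⟨ted r, (PySem.Set.mem_ofList _ _).mpr hmem, rfl⟩
      simpa [hk] using hin
    · have hnin : ted r ∉ B := by
        rw [hB]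
        intro hc
        rcases List.mem_map.mp hc with ⟨q, hq, hq1⟩
        rcases List.mem_filter.mp hq with ⟨hq2, hq3⟩
        rcases List.mem_map.mp hq2 with ⟨u, _, rfl⟩
        subst hq1
        exact hk (by simpa using hq3)
      simpa [hk] using hnin
  have hmail : List.foldl
      (fun d r => if (PySem.Set.ofList B).contains (ted r) = true
        then d.modify (rp r) 0 (fun x => x + 1) else d)
      (List.foldl (fun (d : PySem.Dict String Int) i => d.insert i 0) PySem.Dict.empty base) S
      = ((S.filter (fun r => decide (k ≤ ((S.map ted).count (ted r) : Int)))).map rp).foldl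
          (fun (d : PySem.Dict String Int) x => d.modify x 0 (fun y => y + 1))
          (List.foldl (fun (d : PySem.Dict String Int) i => d.insert i 0) PySem.Dict.empty base) := by
    rw [PySem.List.foldl_congr_mem S _
          (fun d r => if (decide (k ≤ ((S.map ted).count (ted r) : Int))) = true
            then d.modify (rp r) 0 (fun x => x + 1) else d) _
          (fun acc x hx => by rw [hb x hx]),
        PySem.List.foldl_if_eq_foldl_filter (p := fun r => decide (k ≤ ((S.map ted).count (ted r) : Int))),
        ← List.foldl_map (f := rp) (g := fun (d : PySem.Dict String Int) x => d.modify x 0 (fun y => y + 1))]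
  rw [hmail]
  have hkeys : (((S.filter (fun r => decide (k ≤ ((S.map ted).count (ted r) : Int)))).map rp).foldl
      (fun (d : PySem.Dict String Int) x => d.modify x 0 (fun y => y + 1))
      (List.foldl (fun (d : PySem.Dict String Int) i => d.insert i 0) PySem.Dict.empty base)).keys
      = PySem.Set.ofList base := by
    rw [pv_modify_keys]
    refine pv_update_of_sub base _ (fun y hy => ?_)
    rcases List.mem_map.mp hy with ⟨r, hr, rfl⟩
    exact hrp r (List.mem_of_mem_filter hr)
  rw [hkeys]
  refine List.map_congr_left (fun j hj => ?_)
  rw [pv_modify_getD]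

-- A's whole pipeline, same symbolic pieces
theorem pvA_pipeline (S base : List String) (ted rp : String → String) (k : Int)
    (hted : ∀ r ∈ S, ted r ∈ base) (hrp : ∀ r ∈ S, rp r ∈ base) :
    (List.foldl
      (fun acc i => acc ++
        [(List.foldl
            (fun d i =>
              ((List.foldl (fun (d : PySem.Dict String (List String)) r =>
                  d.modify (ted r) [] (fun x => x ++ [rp r]))
                (List.foldl (fun (d : PySem.Dict String (List String)) i => d.insert i []) PySem.Dict.empty base)
                S).getD i []).foldl (fun d j => d.modify j 0 (fun x => x + 1)) d)
            (List.foldl (fun (d : PySem.Dict String Int) i => d.insert i 0) PySem.Dict.empty base)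
            (List.foldl
              (fun acc i =>
                if k ≤ (List.foldl (fun (d : PySem.Dict String Int) r => d.modify (ted r) 0 (fun x => x + 1))
                    (List.foldl (fun (d : PySem.Dict String Int) i => d.insert i 0) PySem.Dict.empty base)
                    S).getD i 0
                then acc ++ [i] else acc) []
              (List.foldl (fun (d : PySem.Dict String Int) r => d.modify (ted r) 0 (fun x => x + 1))
                (List.foldl (fun (d : PySem.Dict String Int) i => d.insert i 0) PySem.Dict.empty base)
                S).keys)).getD i 0])
      []
      (List.foldl
        (fun d i =>
          ((List.foldl (fun (d : PySem.Dict String (List String)) r =>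
              d.modify (ted r) [] (fun x => x ++ [rp r]))
            (List.foldl (fun (d : PySem.Dict String (List String)) i => d.insert i []) PySem.Dict.empty base)
            S).getD i []).foldl (fun d j => d.modify j 0 (fun x => x + 1)) d)
        (List.foldl (fun (d : PySem.Dict String Int) i => d.insert i 0) PySem.Dict.empty base)
        (List.foldl
          (fun acc i =>
            if k ≤ (List.foldl (fun (d : PySem.Dict String Int) r => d.modify (ted r) 0 (fun x => x + 1))
                (List.foldl (fun (d : PySem.Dict String Int) i => d.insert i 0) PySem.Dict.empty base)
                S).getD i 0
            then acc ++ [i] else acc) []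
          (List.foldl (fun (d : PySem.Dict String Int) r => d.modify (ted r) 0 (fun x => x + 1))
            (List.foldl (fun (d : PySem.Dict String Int) i => d.insert i 0) PySem.Dict.empty base)
            S).keys)).keys)
    = (PySem.Set.ofList base).map (fun j =>
        (((S.filter (fun r => decide (k ≤ ((S.map ted).count (ted r) : Int)))).map rp).count j : Int)) := by
  have hNg : ∀ t, (List.foldl (fun (d : PySem.Dict String Int) r => d.modify (ted r) 0 (fun x => x + 1))
      (List.foldl (fun (d : PySem.Dict String Int) i => d.insert i 0) PySem.Dict.empty base) S).getD t 0
      = ((S.map ted).count t : Int) := by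
    intro t
    rw [← List.foldl_map (f := ted) (g := fun (d : PySem.Dict String Int) x => d.modify x 0 (fun y => y + 1)),
        pv_modify_getD]
  have hNkeys : (List.foldl (fun (d : PySem.Dict String Int) r => d.modify (ted r) 0 (fun x => x + 1))
      (List.foldl (fun (d : PySem.Dict String Int) i => d.insert i 0) PySem.Dict.empty base) S).keys
      = PySem.Set.ofList base := by
    rw [← List.foldl_map (f := ted) (g := fun (d : PySem.Dict String Int) x => d.modify x 0 (fun y => y + 1)),
        pv_modify_keys]
    refine pv_update_of_sub base _ (fun y hy => ?_)
    rcases List.mem_map.mp hy with ⟨r, hr, rfl⟩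
    exact hted r hr
  have hLg : ∀ t, (List.foldl (fun (d : PySem.Dict String (List String)) r =>
      d.modify (ted r) [] (fun x => x ++ [rp r]))
      (List.foldl (fun (d : PySem.Dict String (List String)) i => d.insert i []) PySem.Dict.empty base) S).getD t []
      = (S.filter (fun r => ted r == t)).map rp := by
    intro t
    rw [← List.foldl_map (f := fun r => (ted r, rp r))
          (g := fun (d : PySem.Dict String (List String)) q => d.modify q.1 [] (fun x => x ++ [q.2])),
        pv_group_getD, List.filter_map, List.map_map]
    simp [Function.comp_def]
  simp only [hNg, hNkeys, hLg]
  rw [PySem.List.foldl_append_ite_eq_filter (p := fun i => k ≤ ((S.map ted).count i : Int)), List.nil_append]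
  rw [← List.foldl_flatMap (f := fun i => (S.filter (fun r => ted r == i)).map rp)
        (g := fun (d : PySem.Dict String Int) j => d.modify j 0 (fun x => x + 1))]
  have hADkeys : ((((PySem.Set.ofList base).filter
        (fun i => decide (k ≤ ((S.map ted).count i : Int)))).flatMap
          (fun i => (S.filter (fun r => ted r == i)).map rp)).foldl
        (fun (d : PySem.Dict String Int) x => d.modify x 0 (fun y => y + 1))
        (List.foldl (fun (d : PySem.Dict String Int) i => d.insert i 0) PySem.Dict.empty base)).keys
      = PySem.Set.ofList base := by
    rw [pv_modify_keys]
    refine pv_update_of_sub base _ (fun y hy => ?_)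
    rcases List.mem_flatMap.mp hy with ⟨i, hi, hyi⟩
    rcases List.mem_map.mp hyi with ⟨r, hr, rfl⟩
    exact hrp r (List.mem_of_mem_filter hr)
  simp only [PySem.List.foldl_append_singleton_eq_map, List.nil_append, hADkeys]
  refine List.map_congr_left (fun j hj => ?_)
  rw [pv_modify_getD]
  have hn : ((PySem.Set.ofList base).filter
      (fun i => decide (k ≤ ((S.map ted).count i : Int)))).Nodup :=
    (PySem.Set.nodup_ofList base).filter _
  have hiff : ∀ r ∈ S,
      (ted r ∈ (PySem.Set.ofList base).filter (fun i => decide (k ≤ ((S.map ted).count i : Int))))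
        ↔ (decide (k ≤ ((S.map ted).count (ted r) : Int)) = true) := by
    intro r hr
    constructor
    · intro hm; exact (List.mem_filter.mp hm).2
    · intro hp
      exact List.mem_filter.mpr ⟨(PySem.Set.mem_ofList _ _).mpr (hted r hr), hp⟩
  exact congrArg _ (pv_core S _ hn rp ted _ hiff j)

-- ===== VERDICT (by name: the statement is the Claim_ definition above) =====
theorem solution_spec : Claim_equal_solution := by
  intro id_list report k _ hpre
  have hted : ∀ r ∈ PySem.Set.ofList report, (PySem.Str.split₀ r).getD 1 "" ∈ id_list :=
    fun r hr => (hpre r ((PySem.Set.mem_ofList report r).mp hr)).2.2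
  have hrp : ∀ r ∈ PySem.Set.ofList report, (PySem.Str.split₀ r).getD 0 "" ∈ id_list :=
    fun r hr => (hpre r ((PySem.Set.mem_ofList report r).mp hr)).2.1
  have hA := pvA_pipeline (PySem.Set.ofList report) id_list
    (fun r => (PySem.Str.split₀ r).getD 1 "") (fun r => (PySem.Str.split₀ r).getD 0 "") k hted hrp
  have hB := pvB_pipeline (PySem.Set.ofList report) id_list
    (fun r => (PySem.Str.split₀ r).getD 1 "") (fun r => (PySem.Str.split₀ r).getD 0 "") k hted hrp
  unfold Spec_solution
  simp only [solution, solution_alt]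
  rw [PySem.List.foldl_prod_mk
        (f := fun (d : PySem.Dict String Int) i => d.insert i 0)
        (g := fun (st : PySem.Dict String (List String) × PySem.Dict String Int) i =>
          (st.1.insert i ([] : List String), st.2.insert i 0))]
  rw [PySem.List.foldl_prod_mk
        (f := fun (d : PySem.Dict String (List String)) i => d.insert i ([] : List String))
        (g := fun (d : PySem.Dict String Int) i => d.insert i 0)]
  rw [PySem.List.foldl_prod_mk
        (f := fun (st : PySem.Dict String Int) i =>
          st.modify ((PySem.Str.split₀ i).getD 1 "") 0 (· + 1))
        (g := fun (st : PySem.Dict String (List String)) i =>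
          st.modify ((PySem.Str.split₀ i).getD 1 "") [] (· ++ [(PySem.Str.split₀ i).getD 0 ""]))]
  exact hA.trans hB.symm
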